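-- pv_equiv track=rewrite | github.com/cedricholz/Wizards-NP-Constraint-Satisfaction | utils.py | sort_wizards
-- ===== SOURCE A (Python) =====
-- def check_wizard_violations(ordered_wizards, constraint_map, wizard):
--     wizard_index = ordered_wizards.index(wizard)
--
--     if wizard_index == 0 or wizard_index == len(ordered_wizards) - 1:
--         return 0
--
--     violations = 0
--     prev_wizards = set(ordered_wizards[:wizard_index])
--     next_wizards = set(ordered_wizards[wizard_index + 1:])
--
--     if wizard in constraint_map:
--         cur_constraints = constraint_map[wizard]
--         for constraint in cur_constraints:
--             wizard1 = constraint[0]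
--             wizard2 = constraint[1]
--
--             if wizard1 in prev_wizards and wizard2 in next_wizards:
--                 violations += 1
--
--             elif wizard2 in prev_wizards and wizard1 in next_wizards:
--                 violations += 1
--
--     return violations
--
-- def sort_wizards(ordered_wizards, constraint_map):
--     wizard_tuples = []
--     for wizard in ordered_wizards:
--         wizard_violations = check_wizard_violations(ordered_wizards, constraint_map, wizard)
--         wizard_tuples.append((wizard, wizard_violations))
--
--     wizard_tuples.sort(key=lambda tup: tup[1])
--
--     sorted_wizards = []
--     for wizard_tup in wizard_tuples:
--         sorted_wizards.append(wizard_tup[0])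
--     return sorted_wizards
-- ===== SOURCE B (Python) =====
-- def sort_wizards(ordered_wizards, constraint_map):
--     # One pass builds first/last occurrence index dicts; each constraint is then
--     # tested with O(1) index comparisons instead of rebuilding slices and sets.
--     first = {}
--     last = {}
--     for i, w in enumerate(ordered_wizards):
--         if w not in first:
--             first[w] = i
--         last[w] = i
--     n = len(ordered_wizards)
--
--     def violations(w):
--         i = first[w]
--         if i == 0 or i == n - 1:
--             return 0
--         v = 0
--         for c in constraint_map.get(w, []):
--             w1, w2 = c[0], c[1]
--             b1 = w1 in first and first[w1] < i
--             a1 = w1 in last and last[w1] > i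
--             b2 = w2 in first and first[w2] < i
--             a2 = w2 in last and last[w2] > i
--             if (b1 and a2) or (b2 and a1):
--                 v += 1
--         return v
--
--     tuples = [(w, violations(w)) for w in ordered_wizards]
--     return [w for w, _ in sorted(tuples, key=lambda t: t[1])]
-- ===== Notes on version B (the rewrite author's own statement) =====
-- stated objective: faster
-- what changed: B builds first/last occurrence index dicts in one pass and tests each constraint with O(1) index comparisons, instead of A's per-wizard list.index, slicing and set construction.
import Mathlib
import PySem

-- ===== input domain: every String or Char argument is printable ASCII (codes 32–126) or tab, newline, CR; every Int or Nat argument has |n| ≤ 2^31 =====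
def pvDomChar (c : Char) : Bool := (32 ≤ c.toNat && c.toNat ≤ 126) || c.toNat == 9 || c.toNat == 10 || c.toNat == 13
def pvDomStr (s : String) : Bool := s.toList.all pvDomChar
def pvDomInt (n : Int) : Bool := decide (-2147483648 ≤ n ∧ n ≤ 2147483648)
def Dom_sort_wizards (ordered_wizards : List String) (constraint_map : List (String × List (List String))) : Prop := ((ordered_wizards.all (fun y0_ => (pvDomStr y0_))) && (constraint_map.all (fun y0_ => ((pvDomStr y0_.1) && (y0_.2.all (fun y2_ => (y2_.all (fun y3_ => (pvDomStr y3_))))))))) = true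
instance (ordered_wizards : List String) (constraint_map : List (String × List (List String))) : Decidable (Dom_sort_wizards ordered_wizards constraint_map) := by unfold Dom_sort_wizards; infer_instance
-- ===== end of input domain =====

-- B builds first/last occurrence index dicts in one pass and tests each constraint with
-- O(1) index comparisons, replacing A's per-wizard list.index, slicing and set building.


-- ===== PORT A =====
-- literal port of A's check_wizard_violations; constraint[0]/[1] use pyGet?, whose 'none'
-- (IndexError) case is excluded by Pre_sort_wizards, so the '.getD ""' there is unreachable on Pre_
def check_wizard_violations (ordered_wizards : List String) (constraint_map : List (String × List (List String))) (wizard : String) : Int :=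
  let wizard_index : Nat := (PySem.List.index? ordered_wizards wizard).getD 0  -- wizard is always a member at the call sites
  if wizard_index == 0 || wizard_index == ordered_wizards.length - 1 then 0
  else
    let prev_wizards := PySem.Set.ofList (PySem.List.slice ordered_wizards none (some (wizard_index : Int)))
    let next_wizards := PySem.Set.ofList (PySem.List.slice ordered_wizards (some ((wizard_index : Int) + 1)) none)
    match (PySem.Dict.mk constraint_map).get? wizard with
    | none => 0
    | some cur_constraints =>
      cur_constraints.foldl (fun violations constraint =>
        let wizard1 := (PySem.List.pyGet? constraint (0 : Int)).getD ""
        let wizard2 := (PySem.List.pyGet? constraint (1 : Int)).getD ""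
        if PySem.Set.contains prev_wizards wizard1 && PySem.Set.contains next_wizards wizard2 then violations + 1
        else if PySem.Set.contains prev_wizards wizard2 && PySem.Set.contains next_wizards wizard1 then violations + 1
        else violations) 0

def sort_wizards (ordered_wizards : List String) (constraint_map : List (String × List (List String))) : List String :=
  let wizard_tuples := ordered_wizards.foldl
    (fun acc wizard => acc ++ [(wizard, check_wizard_violations ordered_wizards constraint_map wizard)]) []
  let sorted_tuples := PySem.List.sorted wizard_tuples (fun tup => tup.2) false
  sorted_tuples.foldl (fun acc wizard_tup => acc ++ [wizard_tup.1]) []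

-- ===== PORT B =====
-- port of Source B: the first/last dict-building pass, and the nested 'violations' as a helper
def altFirst (ordered_wizards : List String) : PySem.Dict String Int :=
  (PySem.List.enumerate ordered_wizards 0).foldl
    (fun d p => if d.contains p.2 then d else d.insert p.2 p.1) PySem.Dict.empty

def altLast (ordered_wizards : List String) : PySem.Dict String Int :=
  (PySem.List.enumerate ordered_wizards 0).foldl (fun d p => d.insert p.2 p.1) PySem.Dict.empty

def altViolations (first last : PySem.Dict String Int) (n : Int) (constraint_map : List (String × List (List String))) (w : String) : Int :=
  let i := first.getD w 0
  if i == 0 || i == n - 1 then 0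
  else
    ((PySem.Dict.mk constraint_map).getD w []).foldl (fun v c =>
      let w1 := (PySem.List.pyGet? c (0 : Int)).getD ""
      let w2 := (PySem.List.pyGet? c (1 : Int)).getD ""
      let b1 := match first.get? w1 with | some j => decide (j < i) | none => false
      let a1 := match last.get? w1 with | some j => decide (i < j) | none => false
      let b2 := match first.get? w2 with | some j => decide (j < i) | none => false
      let a2 := match last.get? w2 with | some j => decide (i < j) | none => false
      if (b1 && a2) || (b2 && a1) then v + 1 else v) 0

def sort_wizards_alt (ordered_wizards : List String) (constraint_map : List (String × List (List String))) : List String :=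
  let first := altFirst ordered_wizards
  let last := altLast ordered_wizards
  let n : Int := ordered_wizards.length
  let tuples := ordered_wizards.map (fun w => (w, altViolations first last n constraint_map w))
  (PySem.List.sorted tuples (fun t => t.2) false).map (fun t => t.1)

-- ===== PRECONDITION & SPEC =====
-- Pre_ excludes exactly the inputs where the Python A raises IndexError: an interior wizard
-- (first index neither 0 nor len-1) whose looked-up constraint list contains a constraint shorter than 2.
def Pre_sort_wizards (ordered_wizards : List String) (constraint_map : List (String × List (List String))) : Prop :=
  ∀ w ∈ ordered_wizards,
    ((PySem.List.index? ordered_wizards w).getD 0 ≠ 0 ∧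
     (PySem.List.index? ordered_wizards w).getD 0 ≠ ordered_wizards.length - 1) →
    ∀ cs, (PySem.Dict.mk constraint_map).get? w = some cs → ∀ c ∈ cs, 2 ≤ c.length
instance (ordered_wizards : List String) (constraint_map : List (String × List (List String))) : Decidable (Pre_sort_wizards ordered_wizards constraint_map) := by unfold Pre_sort_wizards; infer_instance

def pvWitness_sort_wizards : List String × (List (String × List (List String))) :=
  (["a", "b", "c"], [("b", [["a", "c"]])])

def Spec_sort_wizards (ordered_wizards : List String) (constraint_map : List (String × List (List String))) (out : List String) : Prop := out = sort_wizards_alt ordered_wizards constraint_map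
instance (ordered_wizards : List String) (constraint_map : List (String × List (List String))) (out : List String) : Decidable (Spec_sort_wizards ordered_wizards constraint_map out) := by unfold Spec_sort_wizards; infer_instance

-- ===== CLAIM (what is proved, stated in full; the proofs are below) =====
def Claim_equal_sort_wizards : Prop := ∀ (ordered_wizards : List String) (constraint_map : List (String × List (List String))), Dom_sort_wizards ordered_wizards constraint_map → Pre_sort_wizards ordered_wizards constraint_map → Spec_sort_wizards ordered_wizards constraint_map (sort_wizards ordered_wizards constraint_map)

-- ===== LEMMAS AND PROOFS =====

-- the 'first occurrence' fold of B computes first indices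
theorem firstFold_get? (xs : List String) (s : Int) (d : PySem.Dict String Int) (w : String) :
    ((PySem.List.enumerate xs s).foldl (fun d p => if d.contains p.2 then d else d.insert p.2 p.1) d).get? w
      = if d.contains w then d.get? w else (PySem.List.index? xs w).map (fun k => s + (k : Int)) := by
  induction xs generalizing s d with
  | nil =>
    simp only [PySem.List.enumerate_nil, List.foldl_nil]
    split
    · rfl
    · rename_i h
      simp only [PySem.List.index?_eq_idxOf?, List.idxOf?_nil]
      rw [(PySem.Dict.get?_eq_none_iff_contains d w).mpr (by simpa using h)]
      simp
  | cons x t ih =>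
    rw [PySem.List.enumerate_cons]
    simp only [List.foldl_cons]
    rw [ih]
    by_cases hdw : d.contains w = true
    · by_cases hxw : x = w
      · subst hxw
        simp [hdw]
      · have hc : (if d.contains x = true then d else d.insert x s).contains w = true := by
          split
          · exact hdw
          · rw [PySem.Dict.contains_insert]; simp [hdw]
        rw [if_pos hc, if_pos hdw]
        split
        · rfl
        · exact PySem.Dict.get?_insert_of_ne d s (fun h => hxw (Eq.symm h))
    · rw [if_neg hdw]
      by_cases hxw : x = w
      · subst hxw
        rw [if_neg hdw]
        have hc : (d.insert x s).contains x = true := PySem.Dict.contains_insert_self d x s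
        rw [if_pos hc, PySem.Dict.get?_insert_self, PySem.List.index?_cons_self]
        simp
      · have hstep : ((if d.contains x = true then d else d.insert x s)).contains w = false := by
          split
          · simpa using hdw
          · rw [PySem.Dict.contains_insert]
            simp only [Bool.or_eq_false_iff]
            have hwx : ¬ w = x := fun h => hxw (Eq.symm h)
            refine ⟨by simp [hwx], by simpa using hdw⟩
        rw [if_neg (by simp [hstep]), PySem.List.index?_cons_of_ne _ hxw]
        cases h2 : PySem.List.index? t w with
        | none => simp
        | some k => simp; ring

-- the 'last occurrence' fold of B computes last indices (first index of the reverse)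
theorem lastFold_get? (xs : List String) (s : Int) (d : PySem.Dict String Int) (w : String) :
    ((PySem.List.enumerate xs s).foldl (fun d p => d.insert p.2 p.1) d).get? w
      = match PySem.List.index? xs.reverse w with
        | some k => some (s + ((xs.length - 1 - k : Nat) : Int))
        | none => d.get? w := by
  induction xs generalizing s d with
  | nil => simp [PySem.List.enumerate_nil]
  | cons x t ih =>
    rw [PySem.List.enumerate_cons]
    simp only [List.foldl_cons]
    rw [ih]
    by_cases hmem : w ∈ t.reverse
    · have hrw : PySem.List.index? (x :: t).reverse w = PySem.List.index? t.reverse w := by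
        rw [List.reverse_cons]
        exact PySem.List.index?_append_of_mem [x] hmem
      rw [hrw]
      have hk := (PySem.List.index?_isSome_iff t.reverse w).mpr hmem
      cases h2 : PySem.List.index? t.reverse w with
      | none => rw [h2] at hk; simp at hk
      | some k =>
        have hklt : k < t.length := by
          have := PySem.List.getElem_of_index?_eq_some h2
          obtain ⟨hlt, _, _⟩ := this
          simpa using hlt
        simp only []
        congr 1
        simp only [List.length_cons]
        omega
    · by_cases hxw : x = w
      · subst hxw
        have hrw : PySem.List.index? (x :: t).reverse x = some t.length := by
          rw [List.reverse_cons]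
          simpa using PySem.List.index?_append_singleton_self t.reverse x hmem
        rw [hrw]
        have hnone : PySem.List.index? t.reverse x = none := by
          rw [PySem.List.index?_eq_none_iff]; exact hmem
        rw [hnone]
        simp [PySem.Dict.get?_insert_self]
      · have hnone : PySem.List.index? t.reverse w = none := by
          rw [PySem.List.index?_eq_none_iff]; exact hmem
        have hrw : PySem.List.index? (x :: t).reverse w = none := by
          rw [PySem.List.index?_eq_none_iff]
          simp only [List.reverse_cons, List.mem_append, List.mem_singleton]
          rintro (h | h)
          · exact hmem h
          · exact hxw (Eq.symm h)
        rw [hnone, hrw]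
        exact PySem.Dict.get?_insert_of_ne d s (fun h => hxw (Eq.symm h))

theorem mem_take_iff_index? (xs : List String) (u : String) (i : Nat) :
    u ∈ xs.take i ↔ ∃ k, PySem.List.index? xs u = some k ∧ k < i := by
  induction xs generalizing i with
  | nil => simp [PySem.List.index?_eq_idxOf?]
  | cons x t ih =>
    cases i with
    | zero => simp
    | succ j =>
      by_cases hxu : x = u
      · subst hxu
        rw [List.take_succ_cons]
        constructor
        · intro _
          exact ⟨0, PySem.List.index?_cons_self x t, by omega⟩
        · intro _
          exact List.mem_cons_self
      · rw [List.take_succ_cons]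
        rw [PySem.List.index?_cons_of_ne _ hxu]
        simp only [List.mem_cons]
        constructor
        · rintro (h | h)
          · exact absurd (Eq.symm h) (fun h' => hxu h')
          · obtain ⟨k, hk, hki⟩ := (ih j).mp h
            exact ⟨k + 1, by rw [hk]; rfl, by omega⟩
        · rintro ⟨k, hk, hki⟩
          cases h2 : PySem.List.index? t u with
          | none => rw [h2] at hk; simp at hk
          | some m =>
            rw [h2] at hk; simp at hk
            right
            exact (ih j).mpr ⟨m, h2, by omega⟩

theorem mem_drop_iff_rev_index? (xs : List String) (u : String) (i : Nat) :
    u ∈ xs.drop (i + 1) ↔ ∃ k, PySem.List.index? xs.reverse u = some k ∧ i + k + 1 < xs.length := by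
  have hrev : xs.drop (i + 1) = (xs.reverse.take (xs.length - (i + 1))).reverse := by
    rw [← List.reverse_reverse (xs.drop (i + 1)), List.reverse_drop]
  rw [hrev, List.mem_reverse, mem_take_iff_index? xs.reverse u (xs.length - (i + 1))]
  constructor
  · rintro ⟨k, hk, hki⟩
    exact ⟨k, hk, by omega⟩
  · rintro ⟨k, hk, hki⟩
    exact ⟨k, hk, by omega⟩

theorem foldl_push {α β : Type} (xs : List α) (f : α → β) (init : List β) :
    xs.foldl (fun acc x => acc ++ [f x]) init = init ++ xs.map f := by
  induction xs generalizing init with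
  | nil => simp
  | cons x t ih => simp [ih]

-- per-wizard counts agree
theorem viol_eq (ordered_wizards : List String) (constraint_map : List (String × List (List String)))
    (w : String) (hw : w ∈ ordered_wizards) :
    check_wizard_violations ordered_wizards constraint_map w
      = altViolations (altFirst ordered_wizards) (altLast ordered_wizards)
          (ordered_wizards.length : Int) constraint_map w := by
  obtain ⟨k0, hk0⟩ : ∃ k0, PySem.List.index? ordered_wizards w = some k0 := by
    have := (PySem.List.index?_isSome_iff ordered_wizards w).mpr hw
    cases h : PySem.List.index? ordered_wizards w with
    | none => rw [h] at this; simp at this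
    | some k => exact ⟨k, rfl⟩
  have hlen : 1 ≤ ordered_wizards.length := List.length_pos_of_mem hw
  have hfirstw : (altFirst ordered_wizards).get? w = some ((k0 : Int)) := by
    rw [altFirst, firstFold_get?, PySem.Dict.contains_empty, hk0]
    simp
  have hfirst : ∀ u, (altFirst ordered_wizards).get? u
      = (PySem.List.index? ordered_wizards u).map (fun k => ((k : Nat) : Int)) := by
    intro u
    rw [altFirst, firstFold_get?, PySem.Dict.contains_empty]
    simp only [Bool.false_eq_true, if_false]
    cases PySem.List.index? ordered_wizards u <;> simp
  have hlast : ∀ u, (altLast ordered_wizards).get? u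
      = match PySem.List.index? ordered_wizards.reverse u with
        | some k => some (((ordered_wizards.length - 1 - k : Nat) : Int))
        | none => none := by
    intro u
    rw [altLast, lastFold_get?]
    cases PySem.List.index? ordered_wizards.reverse u with
    | none => simp [PySem.Dict.get?_empty]
    | some k => simp
  rw [check_wizard_violations, altViolations]
  rw [hk0]
  simp only [Option.getD_some]
  rw [PySem.Dict.getD_eq_get?_getD, hfirstw]
  simp only [Option.getD_some]
  have hcond : (((k0 : Int)) == 0 || ((k0 : Int)) == (ordered_wizards.length : Int) - 1)
      = ((k0 == 0) || (k0 == ordered_wizards.length - 1)) := by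
    rw [Bool.eq_iff_iff]
    simp only [Bool.or_eq_true, beq_iff_eq]
    omega
  rw [hcond]
  split
  · rfl
  · rw [PySem.Dict.getD_eq_get?_getD]
    cases hcs : (PySem.Dict.mk constraint_map).get? w with
    | none => simp
    | some cs =>
      simp only [Option.getD_some]
      -- the two fold steps are the same function
      have hprev : ∀ u, PySem.Set.contains
            (PySem.Set.ofList (PySem.List.slice ordered_wizards none (some ((k0 : Nat) : Int)))) u
          = (match (altFirst ordered_wizards).get? u with
             | some j => decide (j < ((k0 : Nat) : Int)) | none => false) := by
        intro u
        rw [PySem.List.slice_to_natCast, hfirst u]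
        cases h2 : PySem.List.index? ordered_wizards u with
        | none =>
          rw [PySem.List.index?_eq_idxOf?] at h2
          simp only [Option.map_none]
          rw [Bool.eq_iff_iff]
          simp [PySem.Set.mem_ofList, mem_take_iff_index?, h2]
        | some m =>
          simp only [Option.map_some]
          rw [Bool.eq_iff_iff]
          simp only [PySem.Set.contains_iff, PySem.Set.mem_ofList, mem_take_iff_index?, h2,
            decide_eq_true_eq]
          constructor
          · rintro ⟨k, hk, hki⟩
            have hkm : m = k := by simpa using hk
            subst hkm
            exact_mod_cast hki
          · intro h
            exact ⟨m, rfl, by exact_mod_cast h⟩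
      have hnext : ∀ u, PySem.Set.contains
            (PySem.Set.ofList (PySem.List.slice ordered_wizards (some (((k0 : Nat) : Int) + 1)) none)) u
          = (match (altLast ordered_wizards).get? u with
             | some j => decide (((k0 : Nat) : Int) < j) | none => false) := by
        intro u
        have hc : ((k0 : Nat) : Int) + 1 = ((k0 + 1 : Nat) : Int) := by push_cast; ring
        rw [hc, PySem.List.slice_from_natCast, hlast u]
        cases h2 : PySem.List.index? ordered_wizards.reverse u with
        | none =>
          have h2' := h2
          rw [PySem.List.index?_eq_idxOf?] at h2'
          rw [Bool.eq_iff_iff]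
          simp [PySem.Set.mem_ofList, mem_drop_iff_rev_index?, h2']
        | some m =>
          have hmlt : m < ordered_wizards.length := by
            have := PySem.List.getElem_of_index?_eq_some h2
            obtain ⟨hlt, _, _⟩ := this
            simpa using hlt
          rw [Bool.eq_iff_iff]
          simp only [PySem.Set.contains_iff, PySem.Set.mem_ofList, mem_drop_iff_rev_index?, h2,
            decide_eq_true_eq]
          constructor
          · rintro ⟨k, hk, hki⟩
            have hkm : m = k := by simpa using hk
            subst hkm
            omega
          · intro h
            exact ⟨m, rfl, by omega⟩
      have hstep : (fun (violations : Int) (constraint : List String) =>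
            if PySem.Set.contains (PySem.Set.ofList (PySem.List.slice ordered_wizards none (some ((k0 : Nat) : Int)))) ((PySem.List.pyGet? constraint (0 : Int)).getD "") &&
               PySem.Set.contains (PySem.Set.ofList (PySem.List.slice ordered_wizards (some (((k0 : Nat) : Int) + 1)) none)) ((PySem.List.pyGet? constraint (1 : Int)).getD "") then violations + 1
            else if PySem.Set.contains (PySem.Set.ofList (PySem.List.slice ordered_wizards none (some ((k0 : Nat) : Int)))) ((PySem.List.pyGet? constraint (1 : Int)).getD "") &&
               PySem.Set.contains (PySem.Set.ofList (PySem.List.slice ordered_wizards (some (((k0 : Nat) : Int) + 1)) none)) ((PySem.List.pyGet? constraint (0 : Int)).getD "") then violations + 1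
            else violations)
          = (fun (v : Int) (c : List String) =>
            if ((match (altFirst ordered_wizards).get? ((PySem.List.pyGet? c (0 : Int)).getD "") with | some j => decide (j < ((k0 : Nat) : Int)) | none => false) &&
                (match (altLast ordered_wizards).get? ((PySem.List.pyGet? c (1 : Int)).getD "") with | some j => decide (((k0 : Nat) : Int) < j) | none => false)) ||
               ((match (altFirst ordered_wizards).get? ((PySem.List.pyGet? c (1 : Int)).getD "") with | some j => decide (j < ((k0 : Nat) : Int)) | none => false) &&
                (match (altLast ordered_wizards).get? ((PySem.List.pyGet? c (0 : Int)).getD "") with | some j => decide (((k0 : Nat) : Int) < j) | none => false)) then v + 1 else v) := by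
        funext v c
        rw [hprev ((PySem.List.pyGet? c (0 : Int)).getD ""), hprev ((PySem.List.pyGet? c (1 : Int)).getD ""),
            hnext ((PySem.List.pyGet? c (0 : Int)).getD ""), hnext ((PySem.List.pyGet? c (1 : Int)).getD "")]
        cases (match (altFirst ordered_wizards).get? ((PySem.List.pyGet? c (0 : Int)).getD "") with | some j => decide (j < ((k0 : Nat) : Int)) | none => false) <;>
        cases (match (altLast ordered_wizards).get? ((PySem.List.pyGet? c (1 : Int)).getD "") with | some j => decide (((k0 : Nat) : Int) < j) | none => false) <;>
        cases (match (altFirst ordered_wizards).get? ((PySem.List.pyGet? c (1 : Int)).getD "") with | some j => decide (j < ((k0 : Nat) : Int)) | none => false) <;>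
        cases (match (altLast ordered_wizards).get? ((PySem.List.pyGet? c (0 : Int)).getD "") with | some j => decide (((k0 : Nat) : Int) < j) | none => false) <;>
        simp
      rw [show (0 : Int) = 0 from rfl]
      exact congrFun (congrArg (fun f => List.foldl f 0) hstep) cs

-- ===== VERDICT (by name: the statement is the Claim_ definition above) =====
theorem sort_wizards_spec : Claim_equal_sort_wizards := by
  intro ordered_wizards constraint_map _ _
  unfold Spec_sort_wizards
  rw [sort_wizards, sort_wizards_alt]
  simp only [foldl_push, List.nil_append]
  have hmap : ordered_wizards.map
      (fun wizard => (wizard, check_wizard_violations ordered_wizards constraint_map wizard))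
      = ordered_wizards.map (fun w => (w, altViolations (altFirst ordered_wizards)
          (altLast ordered_wizards) (ordered_wizards.length : Int) constraint_map w)) := by
    apply List.map_congr_left
    intro w hw
    rw [viol_eq ordered_wizards constraint_map w hw]
  rw [hmap]
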